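-- pv_equiv track=rewrite | github.com/s-maddrellmander/Advent_of_Code | solutions/year_2025/day_02.py | scan_range
-- ===== SOURCE A (Python) =====
-- def scan_range(low: int, high: int) -> int:
--     count = 0
--     value = 0
--     for x in range(low, high+1):
--         str_x = str(x)
--         if len(str_x) % 2 == 0:
--             idx = len(str_x) // 2
--             front, back = str_x[:idx], str_x[idx:]
--             if front == back:
--                 count += 1
--                 value += x
--     return count, value
-- ===== SOURCE B (Python) =====
-- def scan_range(low: int, high: int) -> int:
--     # Closed form: the valid numbers are exactly f*(10**k+1) with k-digit front half f,
--     # so count/sum each digit-class with an arithmetic series instead of scanning the range.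
--     count = 0
--     value = 0
--     for k in range(1, len(str(high)) // 2 + 1):
--         m = 10 ** k + 1
--         f_lo = max(10 ** (k - 1), -((-low) // m))
--         f_hi = min(10 ** k - 1, high // m)
--         if f_lo <= f_hi:
--             n = f_hi - f_lo + 1
--             count += n
--             value += m * (f_lo + f_hi) * n // 2
--     return count, value
-- ===== Notes on version B (the rewrite author's own statement) =====
-- stated objective: alternative
-- what changed: Instead of testing every integer in [low, high] by string-splitting, B enumerates the digit-lengths k and for each computes the clamped interval of front-halves f (every valid number is f*(10^k+1)), obtaining count and sum by an arithmetic-series formula; work no longer depends on the width of the range.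
import Mathlib
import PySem

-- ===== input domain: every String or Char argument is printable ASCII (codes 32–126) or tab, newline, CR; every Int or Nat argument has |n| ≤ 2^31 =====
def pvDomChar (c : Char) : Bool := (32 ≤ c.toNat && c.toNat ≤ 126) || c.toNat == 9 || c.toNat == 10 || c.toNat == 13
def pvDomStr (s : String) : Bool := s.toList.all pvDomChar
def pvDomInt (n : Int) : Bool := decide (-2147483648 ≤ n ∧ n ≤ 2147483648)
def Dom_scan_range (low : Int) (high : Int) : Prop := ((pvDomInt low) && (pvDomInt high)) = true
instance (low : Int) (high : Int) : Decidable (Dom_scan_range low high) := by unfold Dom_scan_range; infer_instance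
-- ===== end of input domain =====

-- B replaces A's per-integer string test over [low, high] by enumerating, per digit-length k,
-- the clamped interval of front-halves f (the valid numbers are exactly f*(10^k+1)) and
-- counting/summing each class with an arithmetic-series formula.

-- ===== PORT A =====
def scan_range (low : Int) (high : Int) : Int × Int :=
  (PySem.List.pyRange low (high + 1)).foldl
    (fun st x =>
      let str_x := PySem.Int.toStr x
      if PySem.Int.mod (PySem.Str.len str_x) 2 = 0 then
        let idx := PySem.Int.floordiv (PySem.Str.len str_x) 2
        let front := PySem.Str.slice str_x none (some idx)
        let back := PySem.Str.slice str_x (some idx) none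
        if front = back then (st.1 + 1, st.2 + x) else st
      else st)
    (0, 0)

-- ===== PORT B =====
def scan_range_alt (low : Int) (high : Int) : Int × Int :=
  (PySem.List.pyRange 1 (PySem.Int.floordiv (PySem.Str.len (PySem.Int.toStr high)) 2 + 1)).foldl
    (fun st k =>
      let m : Int := 10 ^ k.toNat + 1
      let f_lo : Int := max (10 ^ (k - 1).toNat) (-(PySem.Int.floordiv (-low) m))
      let f_hi : Int := min (10 ^ k.toNat - 1) (PySem.Int.floordiv high m)
      if f_lo ≤ f_hi then
        let n := f_hi - f_lo + 1
        (st.1 + n, st.2 + PySem.Int.floordiv (m * (f_lo + f_hi) * n) 2)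
      else st)
    (0, 0)

-- ===== PRECONDITION & SPEC =====
def Spec_scan_range (low : Int) (high : Int) (out : Int × Int) : Prop := out = scan_range_alt low high
instance (low : Int) (high : Int) (out : Int × Int) : Decidable (Spec_scan_range low high out) := by unfold Spec_scan_range; infer_instance

-- ===== CLAIM (what is proved, stated in full; the proofs are below) =====
def Claim_equal_scan_range : Prop := ∀ (low : Int) (high : Int), Dom_scan_range low high → Spec_scan_range low high (scan_range low high)

-- ===== LEMMAS AND PROOFS =====
def testA (x : Int) : Bool :=
  let cs := PySem.Int.toChars x
  (cs.length % 2 == 0) && (cs.take (cs.length / 2) == cs.drop (cs.length / 2))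

theorem stepA_eq (x : Int) (st : Int × Int) :
    (let str_x := PySem.Int.toStr x
      if PySem.Int.mod (PySem.Str.len str_x) 2 = 0 then
        let idx := PySem.Int.floordiv (PySem.Str.len str_x) 2
        let front := PySem.Str.slice str_x none (some idx)
        let back := PySem.Str.slice str_x (some idx) none
        if front = back then (st.1 + 1, st.2 + x) else st
      else st) = if testA x then (st.1 + 1, st.2 + x) else st := by
  simp only [testA, PySem.Str.len_eq, PySem.Int.toList_toStr, PySem.Str.slice,
    PySem.Chars.slice, PySem.Int.toList_toStr]
  rw [PySem.Int.mod_eq_emod_of_pos (by norm_num), PySem.Int.floordiv_eq_ediv_of_pos (by norm_num)]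
  set cs := PySem.Int.toChars x with hcs
  have hidx : ((cs.length : Int)) / 2 = ((cs.length / 2 : Nat) : Int) := by
    exact_mod_cast (Int.natCast_div cs.length 2).symm
  rw [hidx, PySem.List.slice_to _ (by positivity), PySem.List.slice_from _ (by positivity)]
  simp only [Int.toNat_natCast, String.ofList_inj]
  have hmod : ((cs.length : Int) % 2 = 0) ↔ (cs.length % 2 == 0) = true := by
    simp; omega
  by_cases h1 : ((cs.length : Int) % 2 = 0) <;>
    by_cases h2 : cs.take (cs.length / 2) = cs.drop (cs.length / 2) <;>
    simp_all

theorem foldA_gen (l : List Int) : ∀ (c v : Int),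
    l.foldl (fun st x =>
      let str_x := PySem.Int.toStr x
      if PySem.Int.mod (PySem.Str.len str_x) 2 = 0 then
        let idx := PySem.Int.floordiv (PySem.Str.len str_x) 2
        let front := PySem.Str.slice str_x none (some idx)
        let back := PySem.Str.slice str_x (some idx) none
        if front = back then (st.1 + 1, st.2 + x) else st
      else st) (c, v) = (c + (l.countP testA : Int), v + (l.filter testA).sum) := by
  induction l with
  | nil => intro c v; simp
  | cons a t ih =>
    intro c v
    rw [List.foldl_cons, stepA_eq a (c, v)]
    by_cases h : testA a = true
    · rw [if_pos h]
      rw [ih]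
      simp [h]
      constructor
      · ring
      · ring
    · rw [if_neg h, ih]
      simp [h]

theorem scan_range'_eq (low high : Int) :
    (PySem.List.pyRange low (high + 1)).foldl
    (fun st x =>
      let str_x := PySem.Int.toStr x
      if PySem.Int.mod (PySem.Str.len str_x) 2 = 0 then
        let idx := PySem.Int.floordiv (PySem.Str.len str_x) 2
        let front := PySem.Str.slice str_x none (some idx)
        let back := PySem.Str.slice str_x (some idx) none
        if front = back then (st.1 + 1, st.2 + x) else st
      else st) (0, 0) =
      (((PySem.List.pyRange low (high + 1)).countP testA : Int),
        ((PySem.List.pyRange low (high + 1)).filter testA).sum) := by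
  rw [foldA_gen]; norm_num

def mK (k : Nat) : Int := 10 ^ k + 1
def fLo (low : Int) (k : Nat) : Int := max ((10 : Int) ^ (k - 1)) (-((-low) / mK k))
def fHi (high : Int) (k : Nat) : Int := min ((10 : Int) ^ k - 1) (high / mK k)
def CK (low high : Int) (k : Nat) : Int :=
  if fLo low k ≤ fHi high k then fHi high k - fLo low k + 1 else 0
def VK (low high : Int) (k : Nat) : Int :=
  if fLo low k ≤ fHi high k then
    mK k * (fLo low k + fHi high k) * (fHi high k - fLo low k + 1) / 2
  else 0

theorem mK_pos (k : Nat) : 0 < mK k := by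
  have : (0:Int) < 10 ^ k := by positivity
  unfold mK; omega

theorem stepB_eq (low high : Int) (k : Nat) (st : Int × Int) :
    (fun (st : Int × Int) (k : Int) =>
      let m : Int := 10 ^ k.toNat + 1
      let f_lo : Int := max (10 ^ (k - 1).toNat) (-(PySem.Int.floordiv (-low) m))
      let f_hi : Int := min (10 ^ k.toNat - 1) (PySem.Int.floordiv high m)
      if f_lo ≤ f_hi then
        let n := f_hi - f_lo + 1
        (st.1 + n, st.2 + PySem.Int.floordiv (m * (f_lo + f_hi) * n) 2)
      else st) st ((k : Int) + 1) =
      (st.1 + CK low high (k + 1), st.2 + VK low high (k + 1)) := by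
  have htn : ((k : Int) + 1).toNat = k + 1 := by omega
  have htn1 : ((k : Int) + 1 - 1).toNat = k := by omega
  simp only [htn, htn1]
  simp only [CK, VK, fLo, fHi, mK, pow_succ,
    PySem.Int.floordiv_eq_ediv_of_pos (by positivity : (0:Int) < 10 ^ k * 10 + 1),
    PySem.Int.floordiv_eq_ediv_of_pos (by norm_num : (0:Int) < 2)]
  norm_num [pow_succ]
  split <;> simp

theorem foldB_gen (low high : Int) : ∀ (Kn : Nat) (c v : Int),
    (PySem.List.pyRange 1 ((Kn : Int) + 1)).foldl
      (fun (st : Int × Int) (k : Int) =>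
        let m : Int := 10 ^ k.toNat + 1
        let f_lo : Int := max (10 ^ (k - 1).toNat) (-(PySem.Int.floordiv (-low) m))
        let f_hi : Int := min (10 ^ k.toNat - 1) (PySem.Int.floordiv high m)
        if f_lo ≤ f_hi then
          let n := f_hi - f_lo + 1
          (st.1 + n, st.2 + PySem.Int.floordiv (m * (f_lo + f_hi) * n) 2)
        else st) (c, v) =
      (c + ((List.range Kn).map (fun i => CK low high (i + 1))).sum,
        v + ((List.range Kn).map (fun i => VK low high (i + 1))).sum) := by
  intro Kn
  induction Kn with
  | zero =>
    intro c v
    rw [show ((0:Nat):Int) + 1 = 1 by norm_num, PySem.List.pyRange_one_eq_nil le_rfl]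
    simp
  | succ K ih =>
    intro c v
    have hcast : ((K + 1 : Nat) : Int) + 1 = ((K : Int) + 1) + 1 := by push_cast; ring
    rw [hcast, PySem.List.pyRange_one_succ_right (by omega), List.foldl_append, ih]
    rw [List.foldl_cons, List.foldl_nil]
    exact (stepB_eq low high K _).trans (by simp [List.range_succ]; constructor <;> ring)


theorem scan_range_alt_eq (low high : Int) :
    scan_range_alt low high =
      (((List.range ((PySem.Int.toChars high).length / 2)).map (fun i => CK low high (i + 1))).sum,
        ((List.range ((PySem.Int.toChars high).length / 2)).map (fun i => VK low high (i + 1))).sum) := by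
  unfold scan_range_alt
  have hlen : PySem.Int.floordiv (PySem.Str.len (PySem.Int.toStr high)) 2 =
      (((PySem.Int.toChars high).length / 2 : Nat) : Int) := by
    rw [PySem.Str.len_eq, PySem.Int.toList_toStr,
      PySem.Int.floordiv_eq_ediv_of_pos (by norm_num : (0:Int) < 2)]
    exact_mod_cast (Int.natCast_div (PySem.Int.toChars high).length 2).symm
  rw [hlen, foldB_gen]
  norm_num

theorem ediv_decomp (m B : Int) : B = m * (B / m) + B % m := (Int.mul_ediv_add_emod B m).symm

theorem cdiv_eq (m A : Int) (hm : 0 < m) : -((-A) / m) = (A - 1) / m + 1 := by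
  have h1 : A - 1 = m * ((A-1)/m) + (A-1) % m := ediv_decomp m (A-1)
  have h2 : 0 ≤ (A-1) % m := Int.emod_nonneg _ (by omega)
  have h3 : (A-1) % m < m := Int.emod_lt_of_pos _ hm
  have h4 : -A = (m - (A-1) % m - 1) + (-(((A-1)/m) + 1)) * m := by linear_combination -h1
  have h5 : (-A) / m = -(((A-1)/m) + 1) := by
    rw [h4, Int.add_mul_ediv_right _ _ (by omega : m ≠ 0)]
    rw [Int.ediv_eq_zero_of_lt (by omega) (by omega)]
    ring
  omega

theorem ediv_pred_not_dvd (m B : Int) (hm : 0 < m) (h : ¬ m ∣ B) : (B - 1) / m = B / m := by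
  have h1 : B = m * (B/m) + B % m := ediv_decomp m B
  have h2 : 0 ≤ B % m := Int.emod_nonneg _ (by omega)
  have h3 : B % m < m := Int.emod_lt_of_pos _ hm
  have h0 : B % m ≠ 0 := by
    intro hz; exact h (Int.dvd_of_emod_eq_zero hz)
  have h4 : B - 1 = (B % m - 1) + (B/m) * m := by linear_combination h1
  rw [h4, Int.add_mul_ediv_right _ _ (by omega : m ≠ 0), Int.ediv_eq_zero_of_lt (by omega) (by omega)]
  ring
theorem ediv_pred_dvd (m B : Int) (hm : 0 < m) (h : m ∣ B) : (B - 1) / m = B / m - 1 := by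
  obtain ⟨t, rfl⟩ := h
  have h4 : m * t - 1 = (m - 1) + (t - 1) * m := by ring
  rw [h4, Int.add_mul_ediv_right _ _ (by omega : m ≠ 0), Int.ediv_eq_zero_of_lt (by omega) (by omega),
    Int.mul_ediv_cancel_left _ (by omega : m ≠ 0)]
  ring

theorem length_pyRange_one (a b : Int) : (PySem.List.pyRange a b).length = (b - a).toNat := by
  by_cases h : a < b
  · simp [PySem.List.pyRange, h]
  · simp [PySem.List.pyRange, h]
    omega

theorem pyRange_filter_between (c d : Int) : ∀ (n : Nat) (a b : Int), (b - a).toNat = n →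
    (PySem.List.pyRange a b).filter (fun x => decide (c ≤ x) && decide (x ≤ d)) =
      PySem.List.pyRange (max a c) (min b (d + 1)) := by
  intro n
  induction n with
  | zero =>
    intro a b h
    rw [PySem.List.pyRange_one_eq_nil (by omega), PySem.List.pyRange_one_eq_nil (by omega : min b (d+1) ≤ max a c)]
    simp
  | succ n ih =>
    intro a b h
    rw [PySem.List.pyRange_one_cons (by omega : a < b), List.filter_cons]
    by_cases h1 : c ≤ a ∧ a ≤ d
    · have : (decide (c ≤ a) && decide (a ≤ d)) = true := by simp [h1.1, h1.2]
      rw [if_pos this, ih (a+1) b (by omega)]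
      have hmax : max (a+1) c = a + 1 := by omega
      have hmax2 : max a c = a := by omega
      rw [hmax, hmax2, PySem.List.pyRange_one_cons (by omega : a < min b (d+1))]
    · have : ¬ ((decide (c ≤ a) && decide (a ≤ d)) = true) := by
        simp only [Bool.and_eq_true, decide_eq_true_eq]; tauto
      rw [if_neg this, ih (a+1) b (by omega)]
      rcases not_and_or.mp h1 with h2 | h2
      · congr 1; omega
      · rw [PySem.List.pyRange_one_eq_nil (by omega), PySem.List.pyRange_one_eq_nil (by omega)]

theorem filter_dvd_pyRange (m : Int) (hm : 0 < m) : ∀ (n : Nat) (A B : Int), (B + 1 - A).toNat = n →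
    (PySem.List.pyRange A (B + 1)).filter (fun x => decide (m ∣ x)) =
      (PySem.List.pyRange (-((-A) / m)) (B / m + 1)).map (· * m) := by
  intro n
  induction n with
  | zero =>
    intro A B h
    rw [PySem.List.pyRange_one_eq_nil (by omega)]
    rw [PySem.List.pyRange_one_eq_nil ?hle]
    · simp
    case hle =>
      rw [cdiv_eq m A hm]
      have : B / m ≤ (A - 1) / m := Int.ediv_le_ediv hm (by omega)
      omega
  | succ n ih =>
    intro A B h
    have hAB : A ≤ B := by omega
    have hstep : PySem.List.pyRange A (B + 1) = PySem.List.pyRange A B ++ [B] :=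
      PySem.List.pyRange_one_succ_right hAB
    have hB1 : B = (B - 1) + 1 := by ring
    rw [hstep, List.filter_append]
    rw [show PySem.List.pyRange A B = PySem.List.pyRange A ((B-1)+1) by norm_num]
    rw [ih A (B-1) (by omega)]
    by_cases hdvd : m ∣ B
    · have hfil : [B].filter (fun x => decide (m ∣ x)) = [B] := by simp [hdvd]
      rw [hfil, ediv_pred_dvd m B hm hdvd]
      have hle2 : -((-A) / m) ≤ B / m := by
        rw [cdiv_eq m A hm]
        have : (A - 1) / m ≤ (B - 1) / m := Int.ediv_le_ediv hm (by omega)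
        have := ediv_pred_dvd m B hm hdvd
        omega
      rw [show B / m - 1 + 1 = B / m by ring,
        PySem.List.pyRange_one_succ_right hle2, List.map_append]
      obtain ⟨t, rfl⟩ := hdvd
      rw [Int.mul_ediv_cancel_left _ (by omega : m ≠ 0)]
      simp [mul_comm]
    · have hfil : [B].filter (fun x => decide (m ∣ x)) = [] := by simp [hdvd]
      rw [hfil, ediv_pred_not_dvd m B hm hdvd]
      simp

theorem two_mul_sum_pyRange : ∀ (n : Nat) (a b : Int), (b + 1 - a).toNat = n → a ≤ b + 1 →
    2 * (PySem.List.pyRange a (b + 1)).sum = (a + b) * (b - a + 1) := by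
  intro n
  induction n with
  | zero =>
    intro a b h hle
    rw [PySem.List.pyRange_one_eq_nil (by omega)]
    have : b - a + 1 = 0 := by omega
    simp [this]
  | succ n ih =>
    intro a b h hle
    have hab : a ≤ b := by omega
    rw [PySem.List.pyRange_one_succ_right hab, List.sum_append]
    have hb : b = (b - 1) + 1 := by ring
    rw [show PySem.List.pyRange a b = PySem.List.pyRange a ((b-1)+1) by norm_num]
    have := ih a (b - 1) (by omega) (by omega)
    simp only [List.sum_cons, List.sum_nil]
    linear_combination this

theorem ediv_min (m u v : Int) (hm : 0 < m) : (min u v) / m = min (u / m) (v / m) := by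
  rcases le_total u v with h | h
  · rw [min_eq_left h, min_eq_left (Int.ediv_le_ediv hm h)]
  · rw [min_eq_right h, min_eq_right (Int.ediv_le_ediv hm h)]

theorem cdiv_max (m u v : Int) (hm : 0 < m) :
    -((-(max u v)) / m) = max (-((-u) / m)) (-((-v) / m)) := by
  rw [show -(max u v) = min (-u) (-v) by omega, ediv_min _ _ _ hm]
  omega

theorem cdiv_mul (m c : Int) (hm : 0 < m) : -((-(c * m)) / m) = c := by
  rw [show -(c * m) = (-c) * m by ring, Int.mul_ediv_cancel _ (by omega : m ≠ 0)]
  ring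

def classB (k : Nat) (x : Int) : Bool :=
  decide (((10 : Int) ^ k + 1) ∣ x ∧ 10 ^ (k - 1) * (10 ^ k + 1) ≤ x ∧ x ≤ ((10 : Int) ^ k - 1) * (10 ^ k + 1))

theorem perk_filter (low high : Int) (k : Nat) :
    (PySem.List.pyRange low (high + 1)).filter (classB k) =
      (PySem.List.pyRange (fLo low k) (fHi high k + 1)).map (· * mK k) := by
  have hm : 0 < mK k := mK_pos k
  have hcls : classB k = fun x => (fun y => decide (mK k ∣ y)) x &&
      ((fun y => decide (10 ^ (k-1) * mK k ≤ y)) x && (fun y => decide (y ≤ ((10:Int) ^ k - 1) * mK k)) x) := by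
    funext x; simp [classB, mK]; rfl
  rw [hcls]
  rw [← List.filter_filter]
  rw [pyRange_filter_between _ _ ((high + 1 - low).toNat) low (high + 1) rfl]
  have hmin : min (high + 1) ((10:Int) ^ k * mK k - mK k + 1) = min high (((10:Int) ^ k - 1) * mK k) + 1 := by
    rw [show ((10:Int) ^ k - 1) * mK k = (10:Int) ^ k * mK k - mK k by ring]; omega
  rw [show ((10:Int) ^ k - 1) * mK k + 1 = (10:Int) ^ k * mK k - mK k + 1 by ring, hmin]
  rw [filter_dvd_pyRange (mK k) hm ((min high (((10:Int)^k - 1) * mK k) + 1 - max low (10 ^ (k-1) * mK k)).toNat) _ _ rfl]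
  congr 1
  · congr 1
    · rw [cdiv_max _ _ _ hm, cdiv_mul _ _ hm]
      rw [fLo, max_comm]
    · rw [ediv_min _ _ _ hm, show ((10:Int) ^ k - 1) * mK k = ((10:Int)^k - 1) * mK k from rfl,
        Int.mul_ediv_cancel _ (by omega : mK k ≠ 0)]
      rw [fHi, min_comm]

theorem perk_count (low high : Int) (k : Nat) :
    ((PySem.List.pyRange low (high + 1)).countP (classB k) : Int) = CK low high k := by
  rw [List.countP_eq_length_filter, perk_filter, List.length_map, length_pyRange_one, CK]
  split <;> omega

theorem perk_sum (low high : Int) (k : Nat) :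
    ((PySem.List.pyRange low (high + 1)).filter (classB k)).sum = VK low high k := by
  rw [perk_filter]
  have hmap : ((PySem.List.pyRange (fLo low k) (fHi high k + 1)).map (· * mK k)).sum =
      (PySem.List.pyRange (fLo low k) (fHi high k + 1)).sum * mK k := by
    have h2 := List.sum_map_mul_right (PySem.List.pyRange (fLo low k) (fHi high k + 1)) id (mK k)
    simpa using h2
  rw [hmap, VK]
  by_cases h : fLo low k ≤ fHi high k
  · rw [if_pos h]
    have hg := two_mul_sum_pyRange ((fHi high k + 1 - fLo low k).toNat) (fLo low k) (fHi high k) rfl (by omega)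
    have : mK k * (fLo low k + fHi high k) * (fHi high k - fLo low k + 1) =
        2 * ((PySem.List.pyRange (fLo low k) (fHi high k + 1)).sum * mK k) := by
      linear_combination (-(mK k)) * hg
    rw [this, Int.mul_ediv_cancel_left _ (by norm_num : (2:Int) ≠ 0)]
  · rw [if_neg h, PySem.List.pyRange_one_eq_nil (by omega)]
    simp

def ClassP (k : Nat) (x : Int) : Prop :=
  ∃ f : Int, 10 ^ (k - 1) ≤ f ∧ f ≤ 10 ^ k - 1 ∧ x = f * (10 ^ k + 1)

theorem classB_iff (k : Nat) (x : Int) : classB k x = true ↔ ClassP k x := by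
  have hm : (0:Int) < 10 ^ k + 1 := by positivity
  simp only [classB, decide_eq_true_eq, ClassP]
  constructor
  · rintro ⟨⟨t, rfl⟩, h1, h2⟩
    exact ⟨t, by nlinarith, by nlinarith, by ring⟩
  · rintro ⟨f, h1, h2, rfl⟩
    exact ⟨⟨f, by ring⟩, by nlinarith, by nlinarith⟩

theorem classP_bounds (k : Nat) (hk : 1 ≤ k) (x : Int) (h : ClassP k x) :
    (10:Int) ^ (2*k - 1) < x ∧ x ≤ 10 ^ (2*k) - 1 := by
  obtain ⟨f, h1, h2, rfl⟩ := h
  have hm : (0:Int) < 10 ^ k + 1 := by positivity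
  have e1 : (10:Int) ^ (k-1) * 10 ^ k = 10 ^ (2*k - 1) := by
    rw [← pow_add]; congr 1; omega
  have e2 : (10:Int) ^ k * 10 ^ k = 10 ^ (2*k) := by
    rw [← pow_add]; congr 1; omega
  have hp : (0:Int) < 10 ^ (k-1) := by positivity
  constructor
  · nlinarith
  · nlinarith

theorem classP_unique (i j : Nat) (x : Int) (hi : 1 ≤ i) (hj : 1 ≤ j) (hij : i ≠ j)
    (h1 : ClassP i x) (h2 : ClassP j x) : False := by
  rcases Nat.lt_or_ge i j with h | h
  · have b1 := classP_bounds i hi x h1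
    have b2 := classP_bounds j hj x h2
    have : (10:Int) ^ (2*i) ≤ 10 ^ (2*j - 1) := pow_le_pow_right₀ (by norm_num) (by omega)
    omega
  · have hlt : j < i := by omega
    have b1 := classP_bounds i hi x h1
    have b2 := classP_bounds j hj x h2
    have : (10:Int) ^ (2*j) ≤ 10 ^ (2*i - 1) := pow_le_pow_right₀ (by norm_num) (by omega)
    omega

def predN (N : Nat) (x : Int) : Bool := (List.range N).any (fun i => classB (i + 1) x)

theorem countP_or_disj (p q : Int → Bool) : ∀ (l : List Int),
    (∀ x ∈ l, ¬(p x = true ∧ q x = true)) →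
    l.countP (fun x => p x || q x) = l.countP p + l.countP q := by
  intro l
  induction l with
  | nil => intro _; simp
  | cons a t ih =>
    intro h
    have ht := ih (fun x hx => h x (List.mem_cons_of_mem a hx))
    have ha := h a List.mem_cons_self
    by_cases hp : p a = true <;> by_cases hq : q a = true <;>
      simp [hp, hq, ht] <;> first | exact absurd (And.intro hp hq) ha | omega

theorem sum_filter_or_disj (p q : Int → Bool) : ∀ (l : List Int),
    (∀ x ∈ l, ¬(p x = true ∧ q x = true)) →
    (l.filter (fun x => p x || q x)).sum = (l.filter p).sum + (l.filter q).sum := by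
  intro l
  induction l with
  | nil => intro _; simp
  | cons a t ih =>
    intro h
    have ht := ih (fun x hx => h x (List.mem_cons_of_mem a hx))
    have ha := h a List.mem_cons_self
    by_cases hp : p a = true <;> by_cases hq : q a = true <;>
      simp [hp, hq, ht] <;> first | exact absurd (And.intro hp hq) ha | ring

theorem predN_succ (N : Nat) (x : Int) :
    predN (N + 1) x = (predN N x || classB (N + 1) x) := by
  simp [predN, List.range_succ]

theorem predN_disj (N : Nat) (x : Int) : ¬(predN N x = true ∧ classB (N + 1) x = true) := by
  rintro ⟨h1, h2⟩
  simp only [predN, List.any_eq_true, List.mem_range] at h1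
  obtain ⟨i, hi, hci⟩ := h1
  exact classP_unique (i+1) (N+1) x (by omega) (by omega) (by omega)
    ((classB_iff _ _).mp hci) ((classB_iff _ _).mp h2)

theorem split_count (l : List Int) : ∀ (N : Nat),
    l.countP (predN N) = ((List.range N).map (fun i => l.countP (classB (i + 1)))).sum := by
  intro N
  induction N with
  | zero => simp [predN]
  | succ N ih =>
    have hcg : l.countP (predN (N+1)) = l.countP (fun x => predN N x || classB (N+1) x) :=
      List.countP_congr (fun x _ => by rw [predN_succ])
    rw [hcg, countP_or_disj _ _ l (fun x _ => predN_disj N x), ih]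
    simp [List.range_succ]

theorem split_sum (l : List Int) : ∀ (N : Nat),
    (l.filter (predN N)).sum = ((List.range N).map (fun i => (l.filter (classB (i + 1))).sum)).sum := by
  intro N
  induction N with
  | zero =>
    have : l.filter (predN 0) = [] := by
      apply List.filter_eq_nil_iff.mpr; intro a _; simp [predN]
    simp [this]
  | succ N ih =>
    have hcg : l.filter (predN (N+1)) = l.filter (fun x => predN N x || classB (N+1) x) :=
      List.filter_congr (fun x _ => by rw [predN_succ])
    rw [hcg, sum_filter_or_disj _ _ l (fun x _ => predN_disj N x), ih]
    simp [List.range_succ]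

theorem toDigitsCore_eq_digits : ∀ (fuel n : Nat) (acc : List Char), 0 < n → n < fuel →
    Nat.toDigitsCore 10 fuel n acc = ((Nat.digits 10 n).map Nat.digitChar).reverse ++ acc := by
  intro fuel
  induction fuel with
  | zero => intro n acc h1 h2; omega
  | succ fuel ih =>
    intro n acc h1 h2
    rw [Nat.toDigitsCore]
    by_cases hz : n / 10 = 0
    · rw [if_pos hz]
      rw [Nat.digits_def' (by norm_num : 1 < 10) h1, hz]
      simp
    · rw [if_neg hz]
      rw [ih (n / 10) _ (by omega) (by
        have : n / 10 < n := Nat.div_lt_self h1 (by norm_num)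
        omega)]
      rw [Nat.digits_def' (by norm_num : 1 < 10) h1]
      simp

theorem toDigits_eq_digits (n : Nat) (hn : 0 < n) :
    Nat.toDigits 10 n = ((Nat.digits 10 n).map Nat.digitChar).reverse := by
  have : Nat.toDigits 10 n = Nat.toDigitsCore 10 (n + 1) n [] := rfl
  rw [this, toDigitsCore_eq_digits (n+1) n [] hn (by omega)]
  simp

theorem digitChar_inj10 : ∀ a < 10, ∀ b < 10, Nat.digitChar a = Nat.digitChar b → a = b := by decide

theorem digitChar_ne_dash : ∀ a < 10, Nat.digitChar a ≠ '-' := by decide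

theorem map_digitChar_inj : ∀ (a b : List Nat), (∀ d ∈ a, d < 10) → (∀ d ∈ b, d < 10) →
    a.map Nat.digitChar = b.map Nat.digitChar → a = b := by
  intro a
  induction a with
  | nil => intro b _ _ h; cases b <;> simp_all
  | cons x t ih =>
    intro b ha hb h
    cases b with
    | nil => simp_all
    | cons y s =>
      simp only [List.map_cons, List.cons.injEq] at h
      have hx := digitChar_inj10 x (ha x (by simp)) y (hb y (by simp)) h.1
      have := ih s (fun d hd => ha d (by simp [hd])) (fun d hd => hb d (by simp [hd])) h.2
      simp [hx, this]

theorem testA_pos_iff (n : Nat) (hn : 0 < n) :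
    testA (n : Int) = true ↔ ∃ k : Nat, 1 ≤ k ∧ ClassP k (n : Int) := by
  have hcs : PySem.Int.toChars (n : Int) = ((Nat.digits 10 n).map Nat.digitChar).reverse := by
    rw [PySem.Int.toChars, if_neg (by omega : ¬ (n : Int) < 0), Int.toNat_natCast]
    exact toDigits_eq_digits n hn
  have hlen : (PySem.Int.toChars (n : Int)).length = (Nat.digits 10 n).length := by
    rw [hcs]; simp
  have hdiglt : ∀ d ∈ Nat.digits 10 n, d < 10 := fun d hd => Nat.digits_lt_base (by norm_num) hd
  set L := (Nat.digits 10 n).length with hL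
  have hL1 : 1 ≤ L := by
    rw [hL]
    have : Nat.digits 10 n ≠ [] := Nat.digits_ne_nil_iff_ne_zero.mpr (by omega)
    cases h : Nat.digits 10 n with
    | nil => exact absurd h this
    | cons a t => simp
  constructor
  · -- forward
    intro h
    simp only [testA, Bool.and_eq_true, beq_iff_eq] at h
    obtain ⟨heven, heq⟩ := h
    rw [hlen] at heven heq
    set k := L / 2 with hk
    have hLk : L = 2 * k := by omega
    have hk1 : 1 ≤ k := by omega
    -- cs = t ++ t
    set cs := PySem.Int.toChars (n : Int) with hcsdef
    have hcslen : cs.length = L := hlen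
    have hsplit : cs = cs.take k ++ cs.drop k := (List.take_append_drop k cs).symm
    have hcs2 : cs = cs.take k ++ cs.take k := by
      conv_lhs => rw [hsplit]
      rw [heq]
    -- digits n = e ++ e
    have hmapeq : (Nat.digits 10 n).map Nat.digitChar = (cs.take k).reverse ++ (cs.take k).reverse := by
      have : cs.reverse = (Nat.digits 10 n).map Nat.digitChar := by rw [hcs]; simp
      rw [← this]
      conv_lhs => rw [hcs2]
      rw [List.reverse_append]
    have htklen : (cs.take k).length = k := by
      rw [List.length_take]; omega
    set u := (cs.take k).reverse with hu
    have hulen : u.length = k := by rw [hu, List.length_reverse]; exact htklen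
    -- split digits
    have hdlen : (Nat.digits 10 n).length = 2 * k := by omega
    have hdsplit : Nat.digits 10 n = (Nat.digits 10 n).take k ++ (Nat.digits 10 n).drop k :=
      (List.take_append_drop k _).symm
    have hmap2 : ((Nat.digits 10 n).take k).map Nat.digitChar ++ ((Nat.digits 10 n).drop k).map Nat.digitChar = u ++ u := by
      rw [← List.map_append, ← hdsplit, hmapeq]
    have hlen1 : (((Nat.digits 10 n).take k).map Nat.digitChar).length = k := by
      simp [List.length_take]; omega
    have happ := List.append_inj hmap2 (by rw [hlen1, hulen])
    have he : (Nat.digits 10 n).take k = (Nat.digits 10 n).drop k := by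
      apply map_digitChar_inj
      · intro d hd; exact hdiglt d (List.mem_of_mem_take hd)
      · intro d hd; exact hdiglt d (List.mem_of_mem_drop hd)
      · rw [happ.1, happ.2]
    set e := (Nat.digits 10 n).take k with he1
    have hde : Nat.digits 10 n = e ++ e := by rw [he1]; conv_lhs => rw [hdsplit]; rw [← he]
    have helen : e.length = k := by rw [he1, List.length_take]; omega
    -- n = f * (10^k + 1)
    have hn2 : n = Nat.ofDigits 10 e + 10 ^ k * Nat.ofDigits 10 e := by
      conv_lhs => rw [← Nat.ofDigits_digits 10 n]
      rw [hde, Nat.ofDigits_append, helen]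
    set f := Nat.ofDigits 10 e with hf
    have hne : e ≠ [] := by
      intro hnil; rw [hnil] at helen; simp at helen; omega
    have hne2 : Nat.digits 10 n ≠ [] := by rw [hde]; simp [hne]
    have helast : e.getLast hne ≠ 0 := by
      have h1 := Nat.getLast_digit_ne_zero 10 (show n ≠ 0 by omega)
      have h3 : (Nat.digits 10 n).getLast? = e.getLast? := by
        rw [hde]; exact List.getLast?_append_of_ne_nil _ hne
      rw [List.getLast?_eq_some_getLast hne2, List.getLast?_eq_some_getLast hne] at h3
      have h4 := Option.some.inj h3
      rw [← h4]
      exact h1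
    have hdf : Nat.digits 10 f = e := Nat.digits_ofDigits 10 (by norm_num) e
      (fun d hd => hdiglt d (by rw [hde]; exact List.mem_append_left e hd)) (fun _ => helast)
    have hflt : f < 10 ^ k := by
      rw [hf, ← helen]; exact Nat.ofDigits_lt_base_pow_length (by norm_num)
        (fun d hd => hdiglt d (by rw [hde]; exact List.mem_append_left e hd))
    have hfne : f ≠ 0 := by
      intro h0
      apply hne
      rw [← hdf, h0]
      simp
    have hfge : 10 ^ (k - 1) ≤ f := by
      have hlog : Nat.log 10 f + 1 = k := by
        rw [← Nat.length_digits 10 f (by norm_num) hfne, hdf, helen]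
      have := Nat.pow_log_le_self 10 hfne
      rw [show k - 1 = Nat.log 10 f by omega]
      exact this
    refine ⟨k, hk1, ⟨(f : Int), ?_, ?_, ?_⟩⟩
    · exact_mod_cast hfge
    · have : (f : Int) < (10:Int) ^ k := by exact_mod_cast hflt
      omega
    · push_cast [hn2]; ring
  · -- backward
    rintro ⟨k, hk1, f, hf1, hf2, hx⟩
    have hfpos : (0:Int) < f := by
      have : (0:Int) < 10 ^ (k-1) := by positivity
      omega
    set fn := f.toNat with hfn
    have hfc : (fn : Int) = f := Int.toNat_of_nonneg (by omega)
    have hnfn : n = fn * (10 ^ k + 1) := by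
      have : (n : Int) = (fn : Int) * ((10:Int) ^ k + 1) := by rw [hfc, hx]
      exact_mod_cast this
    have hfnlt : fn < 10 ^ k := by
      have : (fn : Int) < (10:Int)^k := by rw [hfc]; omega
      exact_mod_cast this
    have hfnge : 10 ^ (k-1) ≤ fn := by
      have : ((10:Int)) ^ (k-1) ≤ (fn : Int) := by rw [hfc]; omega
      exact_mod_cast this
    have hfnne : fn ≠ 0 := by
      have : 0 < 10 ^ (k-1) := Nat.pow_pos (by norm_num)
      omega
    have hlogfn : Nat.log 10 fn = k - 1 :=
      Nat.log_eq_of_pow_le_of_lt_pow hfnge (by rwa [show k - 1 + 1 = k by omega])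
    have hflen : (Nat.digits 10 fn).length = k := by
      rw [Nat.length_digits 10 fn (by norm_num) hfnne, hlogfn]; omega
    have hdig : Nat.digits 10 n = Nat.digits 10 fn ++ Nat.digits 10 fn := by
      have := Nat.digits_append_digits (b := 10) (n := fn) (m := fn) (by norm_num)
      rw [hflen] at this
      rw [hnfn, this]
      congr 1
      ring
    have hLeq : L = 2 * k := by rw [hL, hdig]; simp [hflen]; omega
    simp only [testA, Bool.and_eq_true, beq_iff_eq]
    rw [hlen]
    constructor
    · omega
    · rw [hLeq, hcs, hdig]
      simp only [List.map_append, List.reverse_append]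
      set t := ((Nat.digits 10 fn).map Nat.digitChar).reverse with ht
      have htlen : t.length = k := by rw [ht]; simp [hflen]
      rw [show 2 * k / 2 = k by omega]
      rw [List.take_append_of_le_length (by omega), List.drop_append_of_le_length (by omega)]
      rw [List.take_of_length_le (by omega), List.drop_eq_nil_of_le (by omega)]
      simp

theorem testA_zero : testA 0 = false := by decide

theorem testA_neg (x : Int) (hx : x < 0) : testA x = false := by
  have hm : 0 < x.natAbs := by omega
  have hcs : PySem.Int.toChars x = '-' :: ((Nat.digits 10 x.natAbs).map Nat.digitChar).reverse := by
    rw [PySem.Int.toChars, if_pos hx, toDigits_eq_digits _ hm]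
  set ds := ((Nat.digits 10 x.natAbs).map Nat.digitChar).reverse with hds
  have hdsne : 0 < ds.length := by
    rw [hds]
    simp only [List.length_reverse, List.length_map]
    have : Nat.digits 10 x.natAbs ≠ [] := Nat.digits_ne_nil_iff_ne_zero.mpr (by omega)
    exact List.length_pos_iff.mpr this
  set L := ds.length with hL
  by_contra h
  rw [Bool.not_eq_false] at h
  simp only [testA, hcs, Bool.and_eq_true, beq_iff_eq] at h
  obtain ⟨heven, heq⟩ := h
  simp only [List.length_cons, ← hL] at heven heq
  set hh := (L + 1) / 2 with hhh
  have hh1 : 1 ≤ hh := by omega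
  have hh2 : hh ≤ L := by omega
  have e1 : (('-' :: ds).take hh)[0]? = some '-' := by
    rw [List.getElem?_take_of_lt (by omega)]
    rfl
  have e2 : (('-' :: ds).drop hh)[0]? = ds[hh - 1]? := by
    rw [List.getElem?_drop]
    have : hh + 0 = (hh - 1) + 1 := by omega
    rw [this]
    rfl
  have e3 : ∃ c, ds[hh - 1]? = some c ∧ c ∈ ds := by
    have hlt : hh - 1 < L := by omega
    exact ⟨ds[hh - 1], List.getElem?_eq_getElem hlt, List.getElem_mem hlt⟩
  obtain ⟨c, hc1, hc2⟩ := e3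
  have : c = '-' := by
    rw [heq] at e1
    rw [e2, hc1] at e1
    exact Option.some.inj e1
  rw [hds] at hc2
  rw [List.mem_reverse, List.mem_map] at hc2
  obtain ⟨d, hd1, hd2⟩ := hc2
  exact digitChar_ne_dash d (Nat.digits_lt_base (by norm_num) hd1) (by rw [hd2, this])

theorem testA_iff (x : Int) : testA x = true ↔ ∃ k : Nat, 1 ≤ k ∧ ClassP k x := by
  rcases lt_trichotomy x 0 with h | h | h
  · rw [testA_neg x h]
    simp only [Bool.false_eq_true, false_iff]
    rintro ⟨k, hk, f, h1, h2, rfl⟩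
    have hp : (0:Int) < 10 ^ (k-1) := by positivity
    have hmm : (0:Int) < 10 ^ k + 1 := by positivity
    nlinarith
  · subst h
    rw [testA_zero]
    simp only [Bool.false_eq_true, false_iff]
    rintro ⟨k, hk, f, h1, h2, hx⟩
    have hp : (0:Int) < 10 ^ (k-1) := by positivity
    have hmm : (0:Int) < 10 ^ k + 1 := by positivity
    nlinarith
  · have hn : x = ((x.toNat : Nat) : Int) := by omega
    rw [hn]
    exact testA_pos_iff x.toNat (by omega)

theorem cap_k (high x : Int) (hxh : x ≤ high) (k : Nat) (hk : 1 ≤ k) (h : ClassP k x) :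
    k ≤ (PySem.Int.toChars high).length / 2 := by
  have hb := classP_bounds k hk x h
  have hpos : (0:Int) < x := by
    have : (0:Int) < 10 ^ (2*k - 1) := by positivity
    omega
  have hhigh : 0 < high := by omega
  have hcs : PySem.Int.toChars high = ((Nat.digits 10 high.toNat).map Nat.digitChar).reverse := by
    rw [PySem.Int.toChars, if_neg (by omega : ¬ high < 0)]
    exact toDigits_eq_digits _ (by omega)
  have hlen : (PySem.Int.toChars high).length = (Nat.digits 10 high.toNat).length := by
    rw [hcs]; simp
  have hlt : high.toNat < 10 ^ (Nat.digits 10 high.toNat).length :=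
    Nat.lt_base_pow_length_digits (by norm_num)
  have h2 : (10:Int) ^ (2*k - 1) < 10 ^ (Nat.digits 10 high.toNat).length := by
    calc (10:Int) ^ (2*k - 1) < x := hb.1
    _ ≤ high := hxh
    _ < 10 ^ (Nat.digits 10 high.toNat).length := by
        have hc : (high.toNat : Int) < (((10:Nat) ^ (Nat.digits 10 high.toNat).length : Nat) : Int) := by
          exact_mod_cast hlt
        push_cast at hc ⊢
        omega
  have h3 : 2*k - 1 < (Nat.digits 10 high.toNat).length := by
    by_contra hcon
    have : (10:Int) ^ (Nat.digits 10 high.toNat).length ≤ 10 ^ (2*k-1) :=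
      pow_le_pow_right₀ (by norm_num) (by omega)
    omega
  rw [hlen]
  omega

theorem main_eq (low high : Int) :
    (((PySem.List.pyRange low (high + 1)).countP testA : Int),
      ((PySem.List.pyRange low (high + 1)).filter testA).sum) =
    (((List.range ((PySem.Int.toChars high).length / 2)).map (fun i => CK low high (i + 1))).sum,
      ((List.range ((PySem.Int.toChars high).length / 2)).map (fun i => VK low high (i + 1))).sum) := by
  set R := PySem.List.pyRange low (high + 1) with hR
  set Kn := (PySem.Int.toChars high).length / 2 with hKn
  have hpt : ∀ x ∈ R, (testA x = true ↔ predN Kn x = true) := by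
    intro x hx
    have hxh : x ≤ high := by
      have := PySem.List.mem_pyRange_one.mp (hR ▸ hx)
      omega
    constructor
    · intro ht
      obtain ⟨k, hk1, hk2⟩ := (testA_iff x).mp ht
      have hcap := cap_k high x hxh k hk1 hk2
      simp only [predN, List.any_eq_true, List.mem_range]
      exact ⟨k - 1, by omega, by rw [show k - 1 + 1 = k by omega]; exact (classB_iff k x).mpr hk2⟩
    · intro hp
      simp only [predN, List.any_eq_true, List.mem_range] at hp
      obtain ⟨i, hi, hci⟩ := hp
      exact (testA_iff x).mpr ⟨i + 1, by omega, (classB_iff _ x).mp hci⟩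
  have hcount : R.countP testA = R.countP (predN Kn) := List.countP_congr hpt
  have hfilter : R.filter testA = R.filter (predN Kn) :=
    List.filter_congr (fun x hx => by
      have := hpt x hx
      by_cases h1 : testA x = true
      · rw [h1, (this.mp h1).symm]
      · have h2 : ¬ predN Kn x = true := fun hc => h1 (this.mpr hc)
        simp only [Bool.not_eq_true] at h1 h2
        rw [h1, h2])
  rw [hcount, hfilter, split_count R Kn, split_sum R Kn]
  refine Prod.ext ?_ ?_
  · show (((List.map (fun i => List.countP (classB (i + 1)) R) (List.range Kn)).sum : Nat) : Int) =
      (List.map (fun i => CK low high (i + 1)) (List.range Kn)).sum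
    rw [Nat.cast_list_sum, List.map_map]
    exact congrArg List.sum (List.map_congr_left (fun i _ => perk_count low high (i + 1)))
  · show (List.map (fun i => (List.filter (classB (i + 1)) R).sum) (List.range Kn)).sum =
      (List.map (fun i => VK low high (i + 1)) (List.range Kn)).sum
    exact congrArg List.sum (List.map_congr_left (fun i _ => perk_sum low high (i + 1)))

theorem scan_range_eq (low high : Int) :
    scan_range low high =
      (((PySem.List.pyRange low (high + 1)).countP testA : Int),
        ((PySem.List.pyRange low (high + 1)).filter testA).sum) := by
  unfold scan_range
  exact scan_range'_eq low high

-- ===== VERDICT (by name: the statement is the Claim_ definition above) =====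
theorem scan_range_spec : Claim_equal_scan_range := by
  intro low high _
  unfold Spec_scan_range
  rw [scan_range_eq, scan_range_alt_eq, main_eq]
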